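-- pv_equiv track=rewrite | github.com/almaguer1986/monogate | python/notebooks/sin_construction.py | _node_count_estimate
-- ===== SOURCE A (Python) =====
-- def _node_count_estimate(terms: int) -> dict:
--     """Estimate node count for sin Taylor series using best operators."""
--     # Term 0: x  (1 leaf, 0 internal nodes)
--     nodes = 0
--     for k in range(1, terms):
--         nodes += 3   # pow_exl for x^(2k+1)
--         nodes += 1   # div_edl for / factorial
--         nodes += 5   # sub_eml or add_eml
--     return {
--         "terms": terms,
--         "nodes_best": nodes,
--         "nodes_eml_only": (3 + 15 + 5) * (terms - 1),  # pow_eml(15)+div_eml(15)+sub(5)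
--         "saving_vs_eml_only": (3 + 15 + 5) * (terms - 1) - nodes,
--     }
-- ===== SOURCE B (Python) =====
-- def _node_count_estimate(terms: int) -> dict:
--     """Closed-form node-count estimate for sin Taylor series (no loop)."""
--     nodes = 9 * max(0, terms - 1)
--     eml = 23 * (terms - 1)
--     return {
--         "terms": terms,
--         "nodes_best": nodes,
--         "nodes_eml_only": eml,
--         "saving_vs_eml_only": eml - nodes,
--     }
-- ===== Notes on version B (the rewrite author's own statement) =====
-- stated objective: faster
-- what changed: Replaced the per-term accumulation loop with a closed-form formula nodes = 9*max(0, terms-1).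
import Mathlib
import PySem

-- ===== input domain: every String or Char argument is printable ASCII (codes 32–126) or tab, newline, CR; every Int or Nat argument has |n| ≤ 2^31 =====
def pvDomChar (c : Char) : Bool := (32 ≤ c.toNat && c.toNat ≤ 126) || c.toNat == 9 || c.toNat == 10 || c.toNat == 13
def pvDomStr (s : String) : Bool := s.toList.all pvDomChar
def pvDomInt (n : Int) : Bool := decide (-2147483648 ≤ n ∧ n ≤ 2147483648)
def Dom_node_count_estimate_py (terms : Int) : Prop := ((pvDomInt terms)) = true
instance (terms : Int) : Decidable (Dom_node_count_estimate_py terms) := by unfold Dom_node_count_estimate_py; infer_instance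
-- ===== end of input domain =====

-- B replaces A's per-term accumulation loop with a closed-form formula (O(1) vs O(terms)).

-- ===== PORT A =====
-- literal port: nodes starts at 0, and each k in range(1, terms) adds 3, then 1, then 5
def node_count_estimate_py (terms : Int) : List (String × Int) :=
  let nodes := (PySem.List.pyRange 1 terms 1).foldl (fun n _ => n + 3 + 1 + 5) 0
  [("terms", terms),
   ("nodes_best", nodes),
   ("nodes_eml_only", (3 + 15 + 5) * (terms - 1)),
   ("saving_vs_eml_only", (3 + 15 + 5) * (terms - 1) - nodes)]

-- ===== PORT B =====
def node_count_estimate_py_alt (terms : Int) : List (String × Int) :=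
  let nodes := 9 * max 0 (terms - 1)
  let eml := 23 * (terms - 1)
  [("terms", terms),
   ("nodes_best", nodes),
   ("nodes_eml_only", eml),
   ("saving_vs_eml_only", eml - nodes)]

-- ===== PRECONDITION & SPEC =====
def Spec_node_count_estimate_py (terms : Int) (out : List (String × Int)) : Prop := out = node_count_estimate_py_alt terms
instance (terms : Int) (out : List (String × Int)) : Decidable (Spec_node_count_estimate_py terms out) := by unfold Spec_node_count_estimate_py; infer_instance

-- ===== CLAIM (what is proved, stated in full; the proofs are below) =====
def Claim_equal_node_count_estimate_py : Prop := ∀ (terms : Int), Dom_node_count_estimate_py terms → Spec_node_count_estimate_py terms (node_count_estimate_py terms)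

-- ===== LEMMAS AND PROOFS =====
theorem pv_foldl_const9 (l : List Int) (acc : Int) :
    l.foldl (fun n _ => n + 3 + 1 + 5) acc = acc + 9 * l.length := by
  induction l generalizing acc with
  | nil => simp
  | cons x xs ih => simp [List.foldl, ih]; ring

theorem pv_nodes_eq (terms : Int) :
    (PySem.List.pyRange 1 terms 1).foldl (fun n _ => n + 3 + 1 + 5) 0 = 9 * max 0 (terms - 1) := by
  rw [pv_foldl_const9, PySem.List.length_pyRange_one]
  omega

-- ===== VERDICT (by name: the statement is the Claim_ definition above) =====
theorem node_count_estimate_py_spec : Claim_equal_node_count_estimate_py := by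
  intro terms _
  show _ = _
  simp only [node_count_estimate_py, node_count_estimate_py_alt, pv_nodes_eq]
  norm_num
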